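-- pv_equiv track=rewrite | github.com/JimWasHere/UD_Cohort_problem_set | practice_problems/alphabetical_vowels.py | alphabetical_vowels
-- ===== SOURCE A (Python) =====
-- def all_vowels(words):
--     lst = []
--     for x in words:
--         if "A" in x and "E" in x and "I" in x and "O" in x and "U" in x:
--             lst.append(x)
--     return lst
--
-- def alphabetical_vowels(words):
--     lst = []
--     for x in all_vowels(words):
--         temp = []
--         for y in x:
--             if y in "AEIOU":
--                 temp.append(y)
--         if sorted(temp) == temp:
--             lst.append(x)
--     return lst
-- ===== SOURCE B (Python) =====
-- VOWELS = "AEIOU"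
--
--
-- def alphabetical_vowels(words):
--     out = []
--     for w in words:
--         ok = True
--         seen = set()
--         last = "@"
--         for c in w:
--             if c in VOWELS:
--                 if c < last:
--                     ok = False
--                 last = c
--                 seen.add(c)
--         if ok and len(seen) == 5:
--             out.append(w)
--     return out
-- ===== Notes on version B (the rewrite author's own statement) =====
-- stated objective: alternative
-- what changed: Replaces A's two-stage pipeline (a helper doing five separate substring scans to pre-filter, then a second pass that extracts the vowel sublist and compares it with its sorted copy) with a single scan per word that tracks a running last-seen vowel (order check without any sorting) and a set of vowels seen (presence check); it trades A's multiple passes and sort for one fused pass, though CPython's C-level 'in' keeps A competitive in wall time.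
import Mathlib
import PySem

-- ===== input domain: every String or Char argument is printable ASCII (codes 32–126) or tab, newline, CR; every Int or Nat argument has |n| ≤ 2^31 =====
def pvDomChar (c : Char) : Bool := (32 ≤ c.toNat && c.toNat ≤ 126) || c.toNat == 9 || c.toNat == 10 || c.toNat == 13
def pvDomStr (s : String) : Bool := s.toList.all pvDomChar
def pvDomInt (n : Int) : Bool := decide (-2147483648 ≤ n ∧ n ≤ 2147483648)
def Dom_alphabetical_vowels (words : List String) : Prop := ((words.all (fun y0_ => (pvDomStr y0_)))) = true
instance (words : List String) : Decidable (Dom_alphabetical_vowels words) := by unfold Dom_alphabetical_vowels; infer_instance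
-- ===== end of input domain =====

-- ===== PORT A =====
def all_vowels (words : List String) : List String :=
  words.foldl (fun lst x =>
    if PySem.Str.isIn "A" x && PySem.Str.isIn "E" x && PySem.Str.isIn "I" x &&
       PySem.Str.isIn "O" x && PySem.Str.isIn "U" x
    then lst ++ [x] else lst) []

def alphabetical_vowels (words : List String) : List String :=
  (all_vowels words).foldl (fun lst x =>
    let temp := x.toList.foldl (fun temp y =>
      if PySem.Chars.isIn [y] "AEIOU".toList then temp ++ [y] else temp) []
    if PySem.List.sorted temp (fun c => c) false = temp then lst ++ [x] else lst) []

-- ===== PORT B =====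
-- single pass per word: state (ok, seen-vowel set, last vowel); last starts at '@' (< 'A')
def alphabetical_vowels_alt (words : List String) : List String :=
  words.foldl (fun out w =>
    let st := w.toList.foldl (fun st c =>
      if PySem.Chars.isIn [c] "AEIOU".toList then
        ((if c < st.2.2 then false else st.1), PySem.Set.add st.2.1 c, c)
      else st) ((true, PySem.Set.empty, '@') : Bool × PySem.Set Char × Char)
    if st.1 && st.2.1.length == 5 then out ++ [w] else out) []

-- ===== PRECONDITION & SPEC =====
def Spec_alphabetical_vowels (words : List String) (out : List String) : Prop := out = alphabetical_vowels_alt words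
instance (words : List String) (out : List String) : Decidable (Spec_alphabetical_vowels words out) := by unfold Spec_alphabetical_vowels; infer_instance

-- ===== CLAIM (what is proved, stated in full; the proofs are below) =====
def Claim_equal_alphabetical_vowels : Prop := ∀ (words : List String), Dom_alphabetical_vowels words → Spec_alphabetical_vowels words (alphabetical_vowels words)

-- ===== LEMMAS AND PROOFS =====

-- the vowel test both ports apply to a single character
def isV (c : Char) : Bool := PySem.Chars.isIn [c] "AEIOU".toList

theorem aeiou_toList : "AEIOU".toList = ['A', 'E', 'I', 'O', 'U'] := by decide

theorem singleton_infix_iff (c : Char) (l : List Char) : [c] <:+: l ↔ c ∈ l := by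
  constructor
  · intro h; exact List.singleton_sublist.mp h.sublist
  · intro h
    obtain ⟨s, t, hst⟩ := List.mem_iff_append.mp h
    exact ⟨s, t, by rw [hst]; simp⟩

theorem isIn_singleton_iff_mem (c : Char) (l : List Char) :
    PySem.Chars.isIn [c] l = true ↔ c ∈ l := by
  rw [PySem.Chars.isIn_iff_infix, singleton_infix_iff]

theorem str_isIn_singleton (sub : String) (c : Char) (hc : sub.toList = [c]) (x : String) :
    PySem.Str.isIn sub x = true ↔ c ∈ x.toList := by
  rw [PySem.Str.isIn_iff_infix, hc, singleton_infix_iff]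

theorem vowel_ge (y : Char) (h : isV y = true) : '@' ≤ y := by
  rw [isV, isIn_singleton_iff_mem, aeiou_toList] at h
  fin_cases h <;> decide

theorem pairwise_cons_cons (a b : Char) (l : List Char) :
    (a :: b :: l).Pairwise (· ≤ ·) ↔ a ≤ b ∧ (b :: l).Pairwise (· ≤ ·) := by
  constructor
  · intro h
    rw [List.pairwise_cons] at h
    exact ⟨h.1 b (by simp), h.2⟩
  · rintro ⟨hab, h⟩
    rw [List.pairwise_cons]
    refine ⟨?_, h⟩
    intro b' hb'
    rcases List.mem_cons.mp hb' with rfl | hm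
    · exact hab
    · exact le_trans hab (List.rel_of_pairwise_cons h hm)

-- characterisation of B's inner single-pass fold
theorem foldB_eq (cs : List Char) (ok : Bool) (seen : PySem.Set Char) (last : Char) :
    cs.foldl (fun st c =>
      if PySem.Chars.isIn [c] "AEIOU".toList then
        ((if c < st.2.2 then false else st.1), PySem.Set.add st.2.1 c, c)
      else st) (ok, seen, last) =
    (ok && decide ((last :: cs.filter isV).Pairwise (· ≤ ·)),
     PySem.Set.update seen (cs.filter isV),
     (cs.filter isV).getLastD last) := by
  induction cs generalizing ok seen last with
  | nil => simp [PySem.Set.update]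
  | cons c rest ih =>
    by_cases h : isV c = true
    · have h' : PySem.Chars.isIn [c] "AEIOU".toList = true := h
      have hfc : (c :: rest).filter isV = c :: rest.filter isV := List.filter_cons_of_pos h
      rw [List.foldl_cons]
      simp only [h', if_true]
      rw [ih]
      have hset : PySem.Set.update (PySem.Set.add seen c) (rest.filter isV) =
          PySem.Set.update seen (c :: rest.filter isV) := by
        simp [PySem.Set.update]
      have hbool : ((if c < last then false else ok) &&
            decide ((c :: rest.filter isV).Pairwise (· ≤ ·))) =
          (ok && decide ((last :: c :: rest.filter isV).Pairwise (· ≤ ·))) := by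
        by_cases hlt : c < last
        · have hnp : ¬ ((last :: c :: rest.filter isV).Pairwise (· ≤ ·)) := by
            intro hp
            exact absurd (List.rel_of_pairwise_cons hp (by simp)) (not_le.mpr hlt)
          simp [hlt, hnp]
        · have hle : last ≤ c := not_lt.mp hlt
          have hiff : (last :: c :: rest.filter isV).Pairwise (· ≤ ·) ↔
              (c :: rest.filter isV).Pairwise (· ≤ ·) := by
            rw [pairwise_cons_cons]
            exact ⟨fun h => h.2, fun h => ⟨hle, h⟩⟩
          rw [if_neg hlt, decide_eq_decide.mpr hiff]
      rw [hfc, List.getLastD_cons, ← hset, ← hbool]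
    · have h' : PySem.Chars.isIn [c] "AEIOU".toList = false :=
        Bool.eq_false_iff.mpr h
      have hfc : (c :: rest).filter isV = rest.filter isV := List.filter_cons_of_neg (by simp [h])
      rw [List.foldl_cons]
      simp only [h', Bool.false_eq_true, if_false]
      rw [ih, hfc]

-- A's sortedness test says the vowel sublist is pairwise ordered
theorem sorted_eq_self_iff (l : List Char) :
    (PySem.List.sorted l (fun c => c) false = l) ↔ l.Pairwise (· ≤ ·) := by
  constructor
  · intro h
    have hp := PySem.List.sorted_pairwise l (fun c => c)
    rw [h] at hp
    exact hp
  · intro h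
    exact PySem.List.sorted_eq_self_of_pairwise l (fun c => c) h

-- presence: the deduplicated set of vowels has 5 elements iff all five vowels occur
theorem ofList_length_five (vs : List Char) (hsub : ∀ y ∈ vs, isV y = true) :
    ((PySem.Set.ofList vs).length = 5) ↔ ∀ v ∈ ['A', 'E', 'I', 'O', 'U'], v ∈ vs := by
  have hnd : (PySem.Set.ofList vs).Nodup := PySem.Set.nodup_ofList vs
  have hmem : ∀ x, x ∈ PySem.Set.ofList vs ↔ x ∈ vs := fun x => PySem.Set.mem_ofList vs x
  have hsubV : ∀ y ∈ PySem.Set.ofList vs, y ∈ ['A', 'E', 'I', 'O', 'U'] := by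
    intro y hy
    have hv := hsub y ((hmem y).mp hy)
    rw [isV, isIn_singleton_iff_mem, aeiou_toList] at hv
    exact hv
  constructor
  · intro h5 v hv
    have hss : (PySem.Set.ofList vs).toFinset ⊆ (['A', 'E', 'I', 'O', 'U'] : List Char).toFinset := by
      intro y hy
      rw [List.mem_toFinset] at *
      exact hsubV y hy
    have hc1 : (PySem.Set.ofList vs).toFinset.card = 5 := by
      rw [List.toFinset_card_of_nodup hnd, h5]
    have hc2 : (['A', 'E', 'I', 'O', 'U'] : List Char).toFinset.card = 5 := by decide
    have heq := Finset.eq_of_subset_of_card_le hss (by rw [hc1, hc2])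
    have hvm : v ∈ (PySem.Set.ofList vs).toFinset := by
      rw [heq, List.mem_toFinset]; exact hv
    rw [List.mem_toFinset, hmem] at hvm
    exact hvm
  · intro hall
    have heq : (PySem.Set.ofList vs).toFinset = (['A', 'E', 'I', 'O', 'U'] : List Char).toFinset := by
      apply Finset.Subset.antisymm
      · intro y hy; rw [List.mem_toFinset] at *; exact hsubV y hy
      · intro y hy
        rw [List.mem_toFinset] at *
        rw [hmem]
        exact hall y hy
    have hlen := List.toFinset_card_of_nodup hnd
    rw [heq] at hlen
    have hc2 : (['A', 'E', 'I', 'O', 'U'] : List Char).toFinset.card = 5 := by decide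
    omega

-- pointwise: B's per-word test equals A's combined test
theorem pointwise (x : String) :
    ((PySem.Str.isIn "A" x && PySem.Str.isIn "E" x && PySem.Str.isIn "I" x &&
      PySem.Str.isIn "O" x && PySem.Str.isIn "U" x) &&
     decide (PySem.List.sorted (x.toList.filter isV) (fun c => c) false = x.toList.filter isV)) =
    (let st := x.toList.foldl (fun st c =>
        if PySem.Chars.isIn [c] "AEIOU".toList then
          ((if c < st.2.2 then false else st.1), PySem.Set.add st.2.1 c, c)
        else st) ((true, PySem.Set.empty, '@') : Bool × PySem.Set Char × Char)
     st.1 && st.2.1.length == 5) := by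
  simp only [foldB_eq, Bool.true_and]
  have hupd : PySem.Set.update PySem.Set.empty (x.toList.filter isV) =
      PySem.Set.ofList (x.toList.filter isV) := by
    rw [PySem.Set.ofList_eq_foldl]; rfl
  rw [hupd]
  set vs := x.toList.filter isV with hvs
  have hsub : ∀ y ∈ vs, isV y = true := by
    intro y hy; exact (List.mem_filter.mp hy).2
  have hchain : ('@' :: vs).Pairwise (· ≤ ·) ↔ vs.Pairwise (· ≤ ·) := by
    rw [List.pairwise_cons]
    constructor
    · exact fun h => h.2
    · intro h
      exact ⟨fun y hy => vowel_ge y (hsub y hy), h⟩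
  have hmemv : ∀ v, isV v = true → (v ∈ vs ↔ v ∈ x.toList) := by
    intro v hv
    rw [hvs, List.mem_filter]
    exact ⟨fun h => h.1, fun h => ⟨h, hv⟩⟩
  apply Bool.eq_iff_iff.mpr
  simp only [Bool.and_eq_true, decide_eq_true_eq, beq_iff_eq]
  rw [sorted_eq_self_iff, hchain, ofList_length_five vs hsub]
  have hA : PySem.Str.isIn "A" x = true ↔ 'A' ∈ x.toList := str_isIn_singleton "A" 'A' (by decide) x
  have hE : PySem.Str.isIn "E" x = true ↔ 'E' ∈ x.toList := str_isIn_singleton "E" 'E' (by decide) x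
  have hI : PySem.Str.isIn "I" x = true ↔ 'I' ∈ x.toList := str_isIn_singleton "I" 'I' (by decide) x
  have hO : PySem.Str.isIn "O" x = true ↔ 'O' ∈ x.toList := str_isIn_singleton "O" 'O' (by decide) x
  have hU : PySem.Str.isIn "U" x = true ↔ 'U' ∈ x.toList := str_isIn_singleton "U" 'U' (by decide) x
  constructor
  · rintro ⟨⟨⟨⟨⟨a, e⟩, i⟩, o⟩, u⟩, hch⟩
    refine ⟨hch, ?_⟩
    intro v hv
    fin_cases hv
    · exact (hmemv 'A' (by decide)).mpr (hA.mp a)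
    · exact (hmemv 'E' (by decide)).mpr (hE.mp e)
    · exact (hmemv 'I' (by decide)).mpr (hI.mp i)
    · exact (hmemv 'O' (by decide)).mpr (hO.mp o)
    · exact (hmemv 'U' (by decide)).mpr (hU.mp u)
  · rintro ⟨hch, hall⟩
    refine ⟨⟨⟨⟨⟨?_, ?_⟩, ?_⟩, ?_⟩, ?_⟩, hch⟩
    · exact hA.mpr ((hmemv 'A' (by decide)).mp (hall 'A' (by decide)))
    · exact hE.mpr ((hmemv 'E' (by decide)).mp (hall 'E' (by decide)))
    · exact hI.mpr ((hmemv 'I' (by decide)).mp (hall 'I' (by decide)))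
    · exact hO.mpr ((hmemv 'O' (by decide)).mp (hall 'O' (by decide)))
    · exact hU.mpr ((hmemv 'U' (by decide)).mp (hall 'U' (by decide)))

theorem alphabetical_vowels_eq_filter (words : List String) :
    alphabetical_vowels words =
    words.filter (fun x =>
      (PySem.Str.isIn "A" x && PySem.Str.isIn "E" x && PySem.Str.isIn "I" x &&
       PySem.Str.isIn "O" x && PySem.Str.isIn "U" x) &&
      decide (PySem.List.sorted (x.toList.filter isV) (fun c => c) false = x.toList.filter isV)) := by
  unfold alphabetical_vowels all_vowels
  rw [PySem.List.foldl_append_if_eq_filter]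
  have hinner : ∀ x : String,
      x.toList.foldl (fun temp y =>
        if PySem.Chars.isIn [y] "AEIOU".toList then temp ++ [y] else temp) [] =
      x.toList.filter isV := by
    intro x
    rw [PySem.List.foldl_append_if_eq_filter]
    rfl
  simp only [hinner]
  rw [PySem.List.foldl_append_ite_eq_filter]
  simp only [List.nil_append]
  rw [List.filter_filter]
  apply List.filter_congr
  intro a _
  exact Bool.and_comm _ _

theorem alt_eq_filter (words : List String) :
    alphabetical_vowels_alt words =
    words.filter (fun w =>
      let st := w.toList.foldl (fun st c =>
        if PySem.Chars.isIn [c] "AEIOU".toList then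
          ((if c < st.2.2 then false else st.1), PySem.Set.add st.2.1 c, c)
        else st) ((true, PySem.Set.empty, '@') : Bool × PySem.Set Char × Char)
      st.1 && st.2.1.length == 5) := by
  unfold alphabetical_vowels_alt
  rw [PySem.List.foldl_append_if_eq_filter]
  rfl

-- ===== VERDICT (by name: the statement is the Claim_ definition above) =====
theorem alphabetical_vowels_spec : Claim_equal_alphabetical_vowels := by
  intro words _
  unfold Spec_alphabetical_vowels
  rw [alphabetical_vowels_eq_filter, alt_eq_filter]
  apply List.filter_congr
  intro x _
  exact pointwise x
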